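-- pv_equiv track=rewrite | github.com/Kavex/Minecraft-Crash-Log-Viewer | MinecraftCrashViewer.py | extract_crash_description
-- ===== SOURCE A (Python) =====
-- def extract_crash_description(content):
--     # Look for a line starting with "Description:"
--     for line in content.splitlines():
--         if line.startswith("Description:"):
--             return line.split("Description:")[1].strip()
--     # Fallback: return first line that mentions 'Exception'
--     for line in content.splitlines():
--         if "Exception" in line:
--             return line.strip()
--     return None
-- ===== SOURCE B (Python) =====
-- def extract_crash_description(content):
--     # Single pass: return the first "Description:" line immediately;
--     # thread the first line mentioning 'Exception' as a fallback accumulator.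
--     exception_line = None
--     for line in content.splitlines():
--         if line.startswith("Description:"):
--             return line.split("Description:")[1].strip()
--         if exception_line is None and "Exception" in line:
--             exception_line = line.strip()
--     return exception_line
-- ===== Notes on version B (the rewrite author's own statement) =====
-- stated objective: alternative
-- what changed: Merges A's two sequential scans of the line list into a single pass that threads the first fallback ('Exception'-mentioning) line as an accumulator while still returning a description line immediately.
import Mathlib
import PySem

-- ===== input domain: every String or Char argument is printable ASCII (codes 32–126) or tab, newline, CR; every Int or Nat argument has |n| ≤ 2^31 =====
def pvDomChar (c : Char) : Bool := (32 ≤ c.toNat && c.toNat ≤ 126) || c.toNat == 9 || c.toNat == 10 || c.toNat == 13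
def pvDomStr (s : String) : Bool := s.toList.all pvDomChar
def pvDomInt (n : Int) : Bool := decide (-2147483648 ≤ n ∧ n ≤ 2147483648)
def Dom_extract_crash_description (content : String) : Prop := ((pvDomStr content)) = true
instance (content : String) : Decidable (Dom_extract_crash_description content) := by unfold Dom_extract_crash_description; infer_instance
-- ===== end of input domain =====

-- B merges A's two sequential scans of splitlines into a single pass that
-- threads the first fallback line as an accumulator (objective: alternative decomposition).


-- ===== PORT A =====
-- line.split("Description:")[1].strip() (both Pythons contain this exact expression;
-- the pyGet? none case would be Python's IndexError, unreachable under the startswith guard)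
def pvDescValue (l : String) : Option String :=
  match PySem.Str.split? l "Description:" with
  | some parts => (PySem.List.pyGet? parts 1).map PySem.Str.strip
  | none => none

-- first loop of A: 'some r' = the loop returned r, 'none' = fell through
def pvLoop1 : List String → Option (Option String)
  | [] => none
  | l :: ls =>
    if PySem.Str.startswith l "Description:" then some (pvDescValue l) else pvLoop1 ls

-- second loop of A
def pvLoop2 : List String → Option String
  | [] => none
  | l :: ls =>
    if PySem.Str.isIn "Exception" l then some (PySem.Str.strip l) else pvLoop2 ls

def extract_crash_description (content : String) : Option String :=
  match pvLoop1 (PySem.Str.splitlines content) with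
  | some r => r
  | none => pvLoop2 (PySem.Str.splitlines content)

-- ===== PORT B =====
-- B's single loop; exc is the 'exception_line' accumulator
def pvLoopB : List String → Option String → Option String
  | [], exc => exc
  | l :: ls, exc =>
    if PySem.Str.startswith l "Description:" then pvDescValue l
    else pvLoopB ls
      (if exc.isNone && PySem.Str.isIn "Exception" l then some (PySem.Str.strip l) else exc)

def extract_crash_description_alt (content : String) : Option String :=
  pvLoopB (PySem.Str.splitlines content) none

-- ===== PRECONDITION & SPEC =====
def Spec_extract_crash_description (content : String) (out : Option String) : Prop := out = extract_crash_description_alt content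
instance (content : String) (out : Option String) : Decidable (Spec_extract_crash_description content out) := by unfold Spec_extract_crash_description; infer_instance

-- ===== CLAIM (what is proved, stated in full; the proofs are below) =====
def Claim_equal_extract_crash_description : Prop := ∀ (content : String), Dom_extract_crash_description content → Spec_extract_crash_description content (extract_crash_description content)

-- ===== LEMMAS AND PROOFS =====
-- B's single loop equals A's two loops, for any accumulator state
theorem pvLoopB_eq (ls : List String) :
    ∀ exc : Option String,
      pvLoopB ls exc =
        (pvLoop1 ls).getD (match exc with | some e => some e | none => pvLoop2 ls) := by
  induction ls with
  | nil => intro exc; cases exc <;> simp [pvLoopB, pvLoop1, pvLoop2]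
  | cons l ls ih =>
    intro exc
    by_cases hs : PySem.Str.startswith l "Description:" = true <;>
      by_cases he : PySem.Str.isIn "Exception" l = true <;>
        cases exc <;> simp_all [pvLoopB, pvLoop1, pvLoop2, ih]

-- ===== VERDICT (by name: the statement is the Claim_ definition above) =====
theorem extract_crash_description_spec : Claim_equal_extract_crash_description := by
  intro content _
  unfold Spec_extract_crash_description extract_crash_description extract_crash_description_alt
  rw [pvLoopB_eq]
  cases pvLoop1 (PySem.Str.splitlines content) <;> simp
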